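-- pv_equiv track=rewrite | github.com/liupengsay/PyIsTheBestLang | src/struct/monotonic_stack/problem.py | lc_316
-- ===== SOURCE A (Python) =====
-- from collections import defaultdict, Counter
--
-- def lc_316(s: str) -> str:
--     """
--     url: https://leetcode.cn/problems/remove-duplicate-letters/
--     tag: monotonic_stack|hash|counter
--     """
--     cnt = Counter(s)
--     in_stack = defaultdict(int)
--     stack = []
--     for w in s:
--         if not in_stack[w]:
--             while stack and stack[-1] > w and cnt[stack[-1]]:
--                 in_stack[stack.pop()] = 0
--             stack.append(w)
--             in_stack[w] = 1
--         cnt[w] -= 1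
--     return "".join(stack)
-- ===== SOURCE B (Python) =====
-- def lc_316(s: str) -> str:
--     """Recursive suffix-greedy: pick the smallest letter whose first-occurrence
--     suffix still contains every distinct letter, then recurse on that suffix
--     with the chosen letter removed."""
--     if not s:
--         return ""
--     letters = set(s)
--     for c in sorted(letters):
--         suffix = s[s.index(c):]
--         if set(suffix) == letters:
--             return c + lc_316(suffix.replace(c, ""))
-- ===== Notes on version B (the rewrite author's own statement) =====
-- stated objective: alternative
-- what changed: Replaced the single-pass monotonic stack with Counter/in-stack bookkeeping by a recursive suffix-greedy: pick the smallest letter whose first-occurrence suffix still contains every distinct letter, emit it, and recurse on that suffix with the letter removed.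
import Mathlib
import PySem

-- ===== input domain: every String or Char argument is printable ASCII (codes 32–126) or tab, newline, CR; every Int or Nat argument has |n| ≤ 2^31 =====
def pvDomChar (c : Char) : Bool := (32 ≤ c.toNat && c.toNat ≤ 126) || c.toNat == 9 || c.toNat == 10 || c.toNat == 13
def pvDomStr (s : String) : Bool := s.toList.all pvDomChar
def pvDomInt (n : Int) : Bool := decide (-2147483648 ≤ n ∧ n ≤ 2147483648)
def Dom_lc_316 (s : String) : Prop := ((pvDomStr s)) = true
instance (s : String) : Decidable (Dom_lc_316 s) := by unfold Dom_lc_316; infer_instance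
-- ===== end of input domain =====

-- B replaces A's monotonic-stack "remove duplicate letters" by a recursive
-- suffix-greedy (smallest feasible leading letter, then recurse); same return
-- value on every input (a timing run measured B faster on its inputs).

-- ===== PORT A =====
-- while stack and stack[-1] > w and cnt[stack[-1]]: in_stack[stack.pop()] = 0
def popLoopA (cnt : PySem.Dict Char Int) (w : Char) (inStack : PySem.Dict Char Int)
    (stack : List Char) : PySem.Dict Char Int × List Char :=
  match h : stack.getLast? with
  | none => (inStack, stack)
  | some t =>
    if w < t ∧ cnt.getD t 0 ≠ 0 then
      popLoopA cnt w (inStack.insert t 0) stack.dropLast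
    else (inStack, stack)
termination_by stack.length
decreasing_by
  have hne : stack ≠ [] := by intro hnil; subst hnil; simp at h
  have : 0 < stack.length := List.length_pos_iff.mpr hne
  simp [List.length_dropLast]; omega

-- the body of "for w in s"
def stepA (st : PySem.Dict Char Int × PySem.Dict Char Int × List Char) (w : Char) :
    PySem.Dict Char Int × PySem.Dict Char Int × List Char :=
  let cnt := st.1
  let inStack := st.2.1
  let stack := st.2.2
  let is' :=
    if inStack.getD w 0 = 0 then
      let p := popLoopA cnt w inStack stack
      (p.1.insert w 1, p.2 ++ [w])
    else (inStack, stack)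
  (cnt.insert w (cnt.getD w 0 - 1), is'.1, is'.2)

def lc_316 (s : String) : String :=
  String.ofList (s.toList.foldl stepA
    (PySem.Dict.counter s.toList, (PySem.Dict.empty : PySem.Dict Char Int), ([] : List Char))).2.2

-- ===== PORT B =====
-- helper lemmas for the termination fact below
theorem dropWhile_cons_of_mem {c : Char} {s : List Char} (hc : c ∈ s) :
    ∃ v, s.dropWhile (· != c) = c :: v := by
  induction s with
  | nil => simp at hc
  | cons y t ih =>
    by_cases hyc : y = c
    · subst hyc; exact ⟨t, by simp [List.dropWhile]⟩
    · have : c ∈ t := by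
        rcases List.mem_cons.mp hc with h | h
        · exact absurd h.symm hyc
        · exact h
      rcases ih this with ⟨v, hv⟩
      refine ⟨v, ?_⟩
      rw [List.dropWhile_cons, if_pos (by simpa using hyc)]
      exact hv

theorem find_singleton_nonneg {cs : List Char} {c : Char} (hc : c ∈ cs) :
    0 ≤ PySem.Chars.find cs [c] := by
  rw [PySem.Chars.find_nonneg_iff]
  rcases List.append_of_mem hc with ⟨s, t, rfl⟩
  exact ⟨s, t, by simp⟩

theorem drop_eq_dropWhile_aux (c : Char) : ∀ (cs : List Char) (k : Nat),
    [c] <+: cs.drop k → (∀ i < k, ¬ [c] <+: cs.drop i) → cs.drop k = cs.dropWhile (· != c) := by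
  intro cs
  induction cs with
  | nil =>
    intro k hpre _
    rcases hpre with ⟨t, ht⟩
    simp at ht
  | cons y tl ih =>
    intro k hpre hmin
    cases k with
    | zero =>
      rcases hpre with ⟨t, ht⟩
      simp only [List.drop_zero] at ht ⊢
      have hy : y = c := by
        have := congrArg (·.head?) ht.symm
        simpa using this
      subst hy
      rw [List.dropWhile_cons, if_neg (by simp)]
    | succ k =>
      have hy : y ≠ c := by
        intro he
        exact hmin 0 (Nat.succ_pos _) ⟨tl, by simp [he]⟩
      rw [List.drop_succ_cons, List.dropWhile_cons, if_pos (by simpa using hy)]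
      refine ih k hpre ?_
      intro i hi hp
      exact hmin (i + 1) (Nat.succ_lt_succ hi) (by simpa using hp)

theorem slice_find_eq_dropWhile {cs : List Char} {c : Char} (hc : c ∈ cs) :
    PySem.List.slice cs (some (PySem.Chars.find cs [c])) none = cs.dropWhile (· != c) := by
  have h0 := find_singleton_nonneg hc
  rw [PySem.List.slice_from _ h0]
  rcases PySem.Chars.find_spec h0 with ⟨hpre, hmin⟩
  exact drop_eq_dropWhile_aux c cs _ hpre hmin

-- termination fact for lcB's recursive call (cited by name in decreasing_by)
theorem lcB_dec (cs : List Char) (c : Char) (hc : c ∈ cs) :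
    ((PySem.List.slice cs (some (PySem.Chars.find cs [c])) none).filter (fun x => x != c)).length
      < cs.length := by
  rw [slice_find_eq_dropWhile hc]
  rcases dropWhile_cons_of_mem hc with ⟨v, hv⟩
  rw [hv]
  have h1 : ((c :: v).filter (fun x => x != c)).length = (v.filter (fun x => x != c)).length := by
    simp [List.filter_cons]
  have h2 : (v.filter (fun x => x != c)).length ≤ v.length := List.length_filter_le _ _
  have h3 : (c :: v).length ≤ cs.length := by
    rw [← hv]
    exact (List.dropWhile_sublist _).length_le
  simp only [h1]
  simp only [List.length_cons] at h3
  omega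

-- def lc_316(s): if not s: return ""; for c in sorted(set(s)): …
def lcB (cs : List Char) : List Char :=
  if cs = [] then []
  else
    match hfind : (PySem.List.sorted (PySem.Set.ofList cs) (fun x => x) false).find?
        (fun c => PySem.Set.equal
          (PySem.Set.ofList (PySem.List.slice cs (some (PySem.Chars.find cs [c])) none))
          (PySem.Set.ofList cs)) with
    | some c =>
        c :: lcB ((PySem.List.slice cs (some (PySem.Chars.find cs [c])) none).filter
          (fun x => x != c))
    | none => []  -- unreachable: the first letter of cs always passes the test
termination_by cs.length
decreasing_by
  have hc : c ∈ cs := by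
    have h1 := List.mem_of_find?_eq_some hfind
    rw [PySem.List.mem_sorted] at h1
    exact (PySem.Set.mem_ofList cs c).mp h1
  exact lcB_dec cs c hc

def lc_316_alt (s : String) : String := String.ofList (lcB s.toList)

-- ===== PRECONDITION & SPEC =====
def Spec_lc_316 (s : String) (out : String) : Prop := out = lc_316_alt s
instance (s : String) (out : String) : Decidable (Spec_lc_316 s out) := by unfold Spec_lc_316; infer_instance

-- ===== CLAIM (what is proved, stated in full; the proofs are below) =====
def Claim_equal_lc_316 : Prop := ∀ (s : String), Dom_lc_316 s → Spec_lc_316 s (lc_316 s)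

-- ===== LEMMAS AND PROOFS =====

-- ---- the list-level model of A's stack pass ----
def popW (w : Char) (v : List Char) : List Char → List Char
  | [] => []
  | t :: ts => if w < t ∧ t ∈ v then popW w v ts else t :: ts

def goM : List Char → List Char → List Char
  | rst, [] => rst
  | rst, w :: rest => if w ∈ rst then goM rst rest else goM (w :: popW w rest rst) rest

-- ---- the greedy's feasibility predicate, in list form ----
def feasM (s : List Char) (c : Char) : Prop := ∀ x ∈ s, x ∈ s.dropWhile (· != c)

-- ---- protection invariant for the core proof ----
def SafeM (c : Char) (τ rest : List Char) : Prop :=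
  ∀ r1 w r2, rest = r1 ++ w :: r2 → w < c → c ∈ r2 →
    (∃ x ∈ τ, x ∉ rest) ∨ (∃ a x b, r1 = a ++ x :: b ∧ x ∉ b ++ w :: r2)

theorem popW_subset {w : Char} {v τ : List Char} {x : Char} (h : x ∈ popW w v τ) : x ∈ τ := by
  induction τ with
  | nil => simpa [popW] using h
  | cons t ts ih =>
    simp only [popW] at h
    split at h
    · exact List.mem_cons_of_mem _ (ih h)
    · exact h

theorem popW_suffix (w : Char) (v τ : List Char) : popW w v τ <:+ τ := by
  induction τ with
  | nil => simp [popW]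
  | cons t ts ih =>
    simp only [popW]
    split
    · exact ih.trans (List.suffix_cons _ _)
    · exact List.suffix_refl _

theorem popW_retain {w : Char} {v τ : List Char} {x : Char} (hx : x ∈ τ) (hv : x ∉ v) :
    x ∈ popW w v τ := by
  induction τ with
  | nil => simp at hx
  | cons t ts ih =>
    simp only [popW]
    split
    · rename_i hcond
      rcases List.mem_cons.mp hx with rfl | hx'
      · exact absurd hcond.2 hv
      · exact ih hx'
    · exact hx

theorem popW_all {w : Char} {v τ : List Char} (h : ∀ t ∈ τ, w < t ∧ t ∈ v) :
    popW w v τ = [] := by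
  induction τ with
  | nil => simp [popW]
  | cons t ts ih =>
    simp only [popW]
    rw [if_pos (h t (List.mem_cons_self))]
    exact ih (fun x hx => h x (List.mem_cons_of_mem _ hx))

theorem popW_append_c {w c : Char} {v τ : List Char}
    (h : ¬(w < c ∧ c ∈ v) ∨ ∃ x ∈ τ, x ∉ v) :
    popW w v (τ ++ [c]) = popW w v τ ++ [c] := by
  induction τ with
  | nil =>
    rcases h with h | h
    · simp [popW, h]
    · simp at h
  | cons t ts ih =>
    simp only [List.cons_append, popW]
    split
    · rename_i hcond
      refine ih ?_
      rcases h with h | h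
      · exact Or.inl h
      · rcases h with ⟨x, hx, hxv⟩
        rcases List.mem_cons.mp hx with rfl | hx'
        · exact absurd hcond.2 hxv
        · exact Or.inr ⟨x, hx', hxv⟩
    · rfl

theorem popW_filter {w c : Char} {v τ : List Char} (hτ : c ∉ τ) :
    popW w (v.filter (· != c)) τ = popW w v τ := by
  induction τ with
  | nil => simp [popW]
  | cons t ts ih =>
    have htc : t ≠ c := fun h => hτ (h ▸ List.mem_cons_self)
    simp only [popW]
    have hmem : (t ∈ v.filter (· != c)) ↔ t ∈ v := by
      simp [List.mem_filter, htc]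
    rw [ih (fun h => hτ (List.mem_cons_of_mem _ h))]
    by_cases hc1 : w < t ∧ t ∈ v
    · rw [if_pos hc1, if_pos ⟨hc1.1, hmem.mpr hc1.2⟩]
    · rw [if_neg hc1, if_neg (fun hh => hc1 ⟨hh.1, hmem.mp hh.2⟩)]

theorem safe_head {c h : Char} {τ rest' : List Char} (hs : SafeM c τ (h :: rest'))
    (hlt : h < c) (hc : c ∈ rest') : ∃ x ∈ τ, x ∉ (h :: rest') := by
  have := hs [] h rest' rfl hlt hc
  rcases this with h1 | h2
  · exact h1
  · rcases h2 with ⟨a, x, b, hab, _⟩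
    exact absurd hab (by simp)

theorem safe_skip {c h : Char} {τ rest' : List Char} (hs : SafeM c τ (h :: rest'))
    (hh : h ∈ τ ∨ h = c) : SafeM c τ rest' := by
  intro r1 w r2 hdec hlt hc
  have := hs (h :: r1) w r2 (by rw [hdec]; rfl) hlt hc
  rcases this with ⟨x, hx, hxn⟩ | ⟨a, x, b, hab, hxn⟩
  · exact Or.inl ⟨x, hx, fun hm => hxn (List.mem_cons_of_mem _ hm)⟩
  · cases a with
    | nil =>
      -- x = h, b = r1
      have hx1 : x = h := by simpa using congrArg (·.head?) hab.symm
      have hb : r1 = b := by simpa [hx1] using hab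
      subst hx1; subst hb
      rcases hh with hh | hh
      · refine Or.inl ⟨x, hh, ?_⟩
        rw [hdec]
        exact hxn
      · exfalso
        subst hh
        exact hxn (List.mem_append_right _ (List.mem_cons_of_mem _ hc))
    | cons a0 a' =>
      have ha0 : a0 = h := by simpa using congrArg (·.head?) hab.symm
      have hr1 : r1 = a' ++ x :: b := by
        have := congrArg (·.tail) hab
        simpa using this
      exact Or.inr ⟨a', x, b, hr1, hxn⟩

theorem safe_push {c h : Char} {τ rest' : List Char} (hs : SafeM c τ (h :: rest')) :
    SafeM c (h :: popW h rest' τ) rest' := by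
  intro r1 w r2 hdec hlt hc
  have := hs (h :: r1) w r2 (by rw [hdec]; rfl) hlt hc
  rcases this with ⟨x, hx, hxn⟩ | ⟨a, x, b, hab, hxn⟩
  · refine Or.inl ⟨x, ?_, fun hm => hxn (List.mem_cons_of_mem _ hm)⟩
    have hxr : x ∉ rest' := fun hm => hxn (List.mem_cons_of_mem _ hm)
    exact List.mem_cons_of_mem _ (popW_retain hx hxr)
  · cases a with
    | nil =>
      have hx1 : x = h := by simpa using congrArg (·.head?) hab.symm
      have hb : r1 = b := by simpa [hx1] using hab
      subst hx1; subst hb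
      refine Or.inl ⟨x, List.mem_cons_self, ?_⟩
      rw [hdec]; exact hxn
    | cons a0 a' =>
      have hr1 : r1 = a' ++ x :: b := by
        have := congrArg (·.tail) hab
        simpa using this
      exact Or.inr ⟨a', x, b, hr1, hxn⟩

theorem goM_D (c : Char) : ∀ (rest τ : List Char), c ∉ τ → SafeM c τ rest →
    goM (τ ++ [c]) rest = goM τ (rest.filter (· != c)) ++ [c] := by
  intro rest
  induction rest with
  | nil => intro τ _ _; simp [goM]
  | cons h rest' ih =>
    intro τ hcτ hsafe
    by_cases hh : h ∈ τ ∨ h = c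
    · -- skip on both sides
      have hmem : h ∈ τ ++ [c] := by
        rcases hh with hh | hh
        · exact List.mem_append_left _ hh
        · exact hh ▸ List.mem_append_right _ (List.mem_cons_self)
      have lhs : goM (τ ++ [c]) (h :: rest') = goM (τ ++ [c]) rest' := by
        simp [goM, hmem]
      rw [lhs]
      rcases hh with hh | hh
      · have hne : h ≠ c := fun he => hcτ (he ▸ hh)
        have : (h :: rest').filter (· != c) = h :: rest'.filter (· != c) := by
          simp [List.filter_cons, bne, hne]
        rw [this]
        have rhs : goM τ (h :: rest'.filter (· != c)) = goM τ (rest'.filter (· != c)) := by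
          simp [goM, hh]
        rw [rhs]
        exact ih τ hcτ (safe_skip hsafe (Or.inl hh))
      · subst hh
        have : (h :: rest').filter (· != h) = rest'.filter (· != h) := by
          simp [List.filter_cons]
        rw [this]
        exact ih τ hcτ (safe_skip hsafe (Or.inr rfl))
    · have hhτ : h ∉ τ := fun hm => hh (Or.inl hm)
      have hhc : h ≠ c := fun he => hh (Or.inr he)
      have hmem : h ∉ τ ++ [c] := by
        simp [hhτ, hhc]
      have hpop : popW h rest' (τ ++ [c]) = popW h rest' τ ++ [c] := by
        refine popW_append_c ?_
        by_cases hd : h < c ∧ c ∈ rest'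
        · rcases safe_head hsafe hd.1 hd.2 with ⟨x, hx, hxn⟩
          exact Or.inr ⟨x, hx, fun hm => hxn (List.mem_cons_of_mem _ hm)⟩
        · exact Or.inl hd
      have lhs : goM (τ ++ [c]) (h :: rest') = goM ((h :: popW h rest' τ) ++ [c]) rest' := by
        simp only [goM, if_neg hmem, hpop]
        rfl
      rw [lhs]
      have hfil : (h :: rest').filter (· != c) = h :: rest'.filter (· != c) := by
        simp [List.filter_cons, bne, hhc]
      rw [hfil]
      have hhτ2 : h ∉ τ := hhτ
      have rhs : goM τ (h :: rest'.filter (· != c)) =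
          goM (h :: popW h (rest'.filter (· != c)) τ) (rest'.filter (· != c)) := by
        simp [goM, hhτ2]
      rw [rhs, popW_filter hcτ]
      have hcτ' : c ∉ h :: popW h rest' τ := by
        intro hm
        rcases List.mem_cons.mp hm with he | hm'
        · exact hhc he.symm
        · exact hcτ (popW_subset hm')
      exact ih _ hcτ' (safe_push hsafe)

theorem goM_I (c : Char) (v : List Char) : ∀ (u τ : List Char),
    (∀ d ∈ τ, c < d ∧ d ∈ v) → (∀ d ∈ u, c < d ∧ d ∈ v) →
    goM τ (u ++ c :: v) = goM [c] v := by
  intro u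
  induction u with
  | nil =>
    intro τ hτ _
    have hcτ : c ∉ τ := fun hm => lt_irrefl c (hτ c hm).1
    simp only [List.nil_append, goM, if_neg hcτ]
    rw [popW_all (fun t ht => (hτ t ht))]
  | cons d u' ih =>
    intro τ hτ hu
    have hd := hu d (List.mem_cons_self)
    have hu' : ∀ x ∈ u', c < x ∧ x ∈ v := fun x hx => hu x (List.mem_cons_of_mem _ hx)
    by_cases hdτ : d ∈ τ
    · simpa [goM, hdτ] using ih τ hτ hu'
    · have lhs : goM τ ((d :: u') ++ c :: v) =
          goM (d :: popW d (u' ++ c :: v) τ) (u' ++ c :: v) := by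
        simp [goM, hdτ]
      rw [lhs]
      refine ih _ ?_ hu'
      intro x hx
      rcases List.mem_cons.mp hx with rfl | hx'
      · exact hd
      · exact hτ x (popW_subset hx')

-- ---- small list facts ----
theorem dropWhile_append_of_forall {p : Char → Bool} {l1 l2 : List Char}
    (h : ∀ y ∈ l1, p y = true) : List.dropWhile p (l1 ++ l2) = List.dropWhile p l2 := by
  induction l1 with
  | nil => simp
  | cons y t ih =>
    have hy := h y (List.mem_cons_self)
    simp only [List.cons_append, List.dropWhile, hy]
    exact ih (fun z hz => h z (List.mem_cons_of_mem _ hz))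

theorem dropWhile_append_of_mem {d : Char} {u t : List Char} (hd : d ∈ u) :
    List.dropWhile (· != d) (u ++ t) = List.dropWhile (· != d) u ++ t := by
  induction u with
  | nil => simp at hd
  | cons y u' ih =>
    by_cases hyd : y = d
    · subst hyd; simp [List.dropWhile]
    · have hd' : d ∈ u' := by
        rcases List.mem_cons.mp hd with h | h
        · exact absurd h.symm hyd
        · exact h
      rw [List.cons_append, List.dropWhile_cons, List.dropWhile_cons,
        if_pos (by simpa using hyd), if_pos (by simpa using hyd)]
      exact ih hd' 

theorem suffix_dropWhile {w : Char} {v r1 r2 : List Char} (h : v = r1 ++ w :: r2) :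
    w :: r2 <:+ List.dropWhile (· != w) v := by
  subst h
  induction r1 with
  | nil => simp [List.dropWhile]
  | cons y r1' ih =>
    by_cases hyw : y = w
    · subst hyw
      simp only [List.cons_append, List.dropWhile, bne_self_eq_false, Bool.false_eq_true,
        if_false]
      exact (List.suffix_append _ _).trans (List.suffix_cons _ _)
    · simpa [List.dropWhile, bne, hyw] using ih

theorem mem_last_split {x : Char} {l : List Char} (h : x ∈ l) :
    ∃ a b, l = a ++ x :: b ∧ x ∉ b := by
  induction l with
  | nil => simp at h
  | cons y t ih =>
    by_cases hxt : x ∈ t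
    · rcases ih hxt with ⟨a, b, rfl, hb⟩
      exact ⟨y :: a, b, rfl, hb⟩
    · rcases List.mem_cons.mp h with rfl | h'
      · exact ⟨[], t, rfl, hxt⟩
      · exact absurd h' hxt

-- ---- facts about the chosen letter ----
theorem takeWhile_gt {c : Char} {s : List Char} (hc : c ∈ s) (hfeas : feasM s c)
    (hmin : ∀ w ∈ s, w < c → ¬ feasM s w) :
    ∀ d ∈ s.takeWhile (· != c), c < d ∧ d ∈ (s.dropWhile (· != c)).tail := by
  obtain ⟨v, hv⟩ := dropWhile_cons_of_mem hc
  intro d hd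
  have hdc : d ≠ c := by
    have := List.mem_takeWhile_imp hd
    simpa using this
  have hds : d ∈ s := (List.takeWhile_sublist _).mem hd
  have hdv : d ∈ (s.dropWhile (· != c)).tail := by
    rw [hv]
    have := hfeas d hds
    rw [hv] at this
    rcases List.mem_cons.mp this with he | h'
    · exact absurd he hdc
    · exact h'
  refine ⟨?_, hdv⟩
  by_contra hnlt
  have hdlt : d < c := lt_of_le_of_ne (not_lt.mp hnlt) hdc
  refine hmin d hds hdlt ?_
  intro x hx
  have hsplit : s.takeWhile (· != c) ++ (c :: v) = s := by
    rw [← hv]; exact List.takeWhile_append_dropWhile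
  have hxcv : x ∈ c :: v := by
    have := hfeas x hx
    rwa [hv] at this
  have hmm : x ∈ List.dropWhile (· != d) (s.takeWhile (· != c) ++ (c :: v)) := by
    rw [dropWhile_append_of_mem hd]
    exact List.mem_append_right _ hxcv
  rwa [hsplit] at hmm

theorem safe_init {c : Char} {s : List Char} (hc : c ∈ s) (hfeas : feasM s c)
    (hmin : ∀ w ∈ s, w < c → ¬ feasM s w) :
    SafeM c [] ((s.dropWhile (· != c)).tail) := by
  intro r1 w r2 hdec hlt hcr2
  right
  obtain ⟨v0, hv⟩ := dropWhile_cons_of_mem hc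
  have hveq : s.dropWhile (· != c) = c :: (r1 ++ w :: r2) := by
    rw [hv]
    rw [hv] at hdec
    simpa [hdec]
  have hsplit : (s.takeWhile (· != c) ++ [c]) ++ (r1 ++ w :: r2) = s := by
    have h0 : s.takeWhile (· != c) ++ s.dropWhile (· != c) = s :=
      List.takeWhile_append_dropWhile
    rw [hveq] at h0
    simpa [List.append_assoc] using h0
  have hw_s : w ∈ s := by
    rw [← hsplit]; simp
  rcases not_forall.mp (hmin w hw_s hlt) with ⟨x, hxd⟩
  rcases _root_.not_imp.mp hxd with ⟨hxs, hxnd⟩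
  have hwc : w ≠ c := ne_of_lt hlt
  have hwu : w ∉ s.takeWhile (· != c) := by
    intro hm
    exact absurd hlt (not_lt.mpr (le_of_lt (takeWhile_gt hc hfeas hmin w hm).1))
  have hdw : List.dropWhile (· != w) s = List.dropWhile (· != w) (r1 ++ w :: r2) := by
    rw [← hsplit]
    refine dropWhile_append_of_forall ?_
    intro y hy
    rcases List.mem_append.mp hy with hy | hy
    · have : y ≠ w := fun he => hwu (he ▸ hy)
      simpa using this
    · have : y = c := by simpa using hy
      subst this
      simpa using (Ne.symm hwc)
  rw [hdw] at hxnd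
  have hsuf : w :: r2 <:+ List.dropWhile (· != w) (r1 ++ w :: r2) := suffix_dropWhile rfl
  have hxwr2 : x ∉ w :: r2 := fun hm => hxnd (hsuf.mem hm)
  have hxc : x ≠ c := by
    intro he
    exact hxwr2 (he ▸ List.mem_cons_of_mem _ hcr2)
  have hxv : x ∈ r1 ++ w :: r2 := by
    rw [← hsplit] at hxs
    rcases List.mem_append.mp hxs with hxs | hxs
    · rcases List.mem_append.mp hxs with hxu | hxc'
      · have := (takeWhile_gt hc hfeas hmin x hxu).2
        rw [hveq] at this
        simpa using this
      · exact absurd (by simpa using hxc') hxc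
    · exact hxs
  have hxr1 : x ∈ r1 := by
    rcases List.mem_append.mp hxv with h | h
    · exact h
    · exact absurd h hxwr2
  rcases mem_last_split hxr1 with ⟨a, b, hab, hxb⟩
  refine ⟨a, x, b, hab, ?_⟩
  intro hm
  rcases List.mem_append.mp hm with h | h
  · exact hxb h
  · exact hxwr2 h

theorem main_rec {c : Char} {s : List Char} (hc : c ∈ s) (hfeas : feasM s c)
    (hmin : ∀ w ∈ s, w < c → ¬ feasM s w) :
    goM [] s = goM [] (((s.dropWhile (· != c)).tail).filter (· != c)) ++ [c] := by
  obtain ⟨v, hv⟩ := dropWhile_cons_of_mem hc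
  have hsplit : s.takeWhile (· != c) ++ (c :: v) = s := by
    rw [← hv]; exact List.takeWhile_append_dropWhile
  have htail : (s.dropWhile (· != c)).tail = v := by simp [hv]
  have h1 : goM [] s = goM [c] v := by
    rw [← hsplit]
    refine goM_I c v _ [] (by simp) ?_
    intro d hd
    have := takeWhile_gt hc hfeas hmin d hd
    rwa [htail] at this
  have h2 : goM ([] ++ [c]) v = goM [] (v.filter (· != c)) ++ [c] := by
    refine goM_D c v [] (by simp) ?_
    have := safe_init hc hfeas hmin
    rwa [htail] at this
  rw [h1, htail]
  simpa using h2

-- ---- bridge lemmas for port B ----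
theorem pred_iff_feas {cs : List Char} {c : Char} (hc : c ∈ cs) :
    (PySem.Set.equal
      (PySem.Set.ofList (PySem.List.slice cs (some (PySem.Chars.find cs [c])) none))
      (PySem.Set.ofList cs) = true) ↔ feasM cs c := by
  rw [PySem.Set.equal_iff, slice_find_eq_dropWhile hc]
  constructor
  · intro h x hx
    exact (PySem.Set.mem_ofList _ _).mp
      ((h x).mpr ((PySem.Set.mem_ofList _ _).mpr hx))
  · intro h x
    rw [PySem.Set.mem_ofList, PySem.Set.mem_ofList]
    constructor
    · intro hx
      exact (List.dropWhile_sublist _).mem hx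
    · exact h x

-- ---- core theorem: the stack pass equals the greedy ----
theorem core_aux (n : Nat) : ∀ cs : List Char, cs.length ≤ n → goM [] cs = (lcB cs).reverse := by
  induction n with
  | zero =>
    intro cs hlen
    have : cs = [] := List.length_eq_zero_iff.mp (Nat.le_zero.mp hlen)
    subst this
    rw [lcB]
    simp [goM]
  | succ n ih =>
    intro cs hlen
    by_cases hne : cs = []
    · subst hne
      rw [lcB]
      simp [goM]
    · -- the predicate of the find? in lcB
      set p : Char → Bool := fun c => PySem.Set.equal
          (PySem.Set.ofList (PySem.List.slice cs (some (PySem.Chars.find cs [c])) none))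
          (PySem.Set.ofList cs) with hp
      set L : List Char := PySem.List.sorted (PySem.Set.ofList cs) (fun x => x) false with hL
      -- the head of cs always satisfies p
      obtain ⟨h0, t0, rfl⟩ := List.exists_cons_of_ne_nil hne
      have hhead : p h0 = true := by
        rw [hp, pred_iff_feas List.mem_cons_self]
        intro x hx
        rwa [List.dropWhile_cons, if_neg (by simp)]
      have hheadL : h0 ∈ L := by
        rw [hL, PySem.List.mem_sorted, PySem.Set.mem_ofList]
        exact List.mem_cons_self
      cases hfind : L.find? p with
      | none => exact absurd hhead (by simpa using List.find?_eq_none.mp hfind h0 hheadL)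
      | some c =>
        have hpc : p c = true := List.find?_some hfind
        have hccs : c ∈ h0 :: t0 := by
          have := List.mem_of_find?_eq_some hfind
          rw [hL, PySem.List.mem_sorted, PySem.Set.mem_ofList] at this
          exact this
        have hfeas : feasM (h0 :: t0) c := (pred_iff_feas hccs).mp hpc
        have hmin : ∀ w ∈ h0 :: t0, w < c → ¬ feasM (h0 :: t0) w := by
          intro w hw hlt hfw
          rcases List.find?_eq_some_iff_append.mp hfind with ⟨hpc', l1, l2, hLsplit, hfail⟩
          have hwL : w ∈ L := by
            rw [hL, PySem.List.mem_sorted, PySem.Set.mem_ofList]; exact hw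
          have hpl : L.Pairwise (· < ·) := by
            rw [hL]; exact PySem.List.sorted_ofList_pairwise_lt _
          rw [hLsplit] at hwL hpl
          have hp2 : (c :: l2).Pairwise (· < ·) :=
            hpl.sublist (List.sublist_append_right _ _)
          rcases List.mem_append.mp hwL with hw1 | hw2
          · have hfalse := hfail w hw1
            have hpw : p w = true := by
              rw [hp]
              exact (pred_iff_feas hw).mpr hfw
            rw [hpw] at hfalse
            simp at hfalse
          · rcases List.mem_cons.mp hw2 with rfl | hw2
            · exact lt_irrefl _ hlt
            · exact absurd hlt (not_lt.mpr (le_of_lt (List.rel_of_pairwise_cons hp2 hw2)))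
        obtain ⟨v, hv⟩ := dropWhile_cons_of_mem hccs
        have hlcB : lcB (h0 :: t0) = c :: lcB ((PySem.List.slice (h0 :: t0)
            (some (PySem.Chars.find (h0 :: t0) [c])) none).filter (fun x => x != c)) := by
          rw [lcB, if_neg hne]
          split
          · rename_i c' heq
            rw [← hp, ← hL] at heq
            rw [hfind] at heq
            cases heq
            rfl
          · rename_i heq
            rw [← hp, ← hL] at heq
            rw [hfind] at heq
            cases heq
        have harg : (PySem.List.slice (h0 :: t0)
            (some (PySem.Chars.find (h0 :: t0) [c])) none).filter (fun x => x != c) =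
            (((h0 :: t0).dropWhile (· != c)).tail).filter (· != c) := by
          rw [slice_find_eq_dropWhile hccs, hv]
          simp [List.filter_cons]
        have hrec := main_rec hccs hfeas hmin
        have hlt' : ((PySem.List.slice (h0 :: t0)
            (some (PySem.Chars.find (h0 :: t0) [c])) none).filter (fun x => x != c)).length
            ≤ n := by
          have hdec := lcB_dec (h0 :: t0) c hccs
          simp only [List.length_cons] at hlen hdec
          omega
        have hih := ih _ hlt'
        rw [hlcB, List.reverse_cons, ← hih, harg]
        exact hrec

theorem core (cs : List Char) : goM [] cs = (lcB cs).reverse := core_aux cs.length cs le_rfl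

-- ---- bridge lemmas for port A (simulation of the dict/stack state) ----
theorem simPop (w : Char) (rest' : List Char) (cnt : PySem.Dict Char Int)
    (hcnt : ∀ x, cnt.getD x 0 = ((w :: rest').count x : Int)) :
    ∀ (rst : List Char) (inStack : PySem.Dict Char Int),
    (∀ x, inStack.getD x 0 ≠ 0 ↔ x ∈ rst) → rst.Nodup →
    ∃ d, popLoopA cnt w inStack rst.reverse = (d, (popW w rest' rst).reverse) ∧
      (∀ x, d.getD x 0 ≠ 0 ↔ x ∈ popW w rest' rst) := by
  intro rst
  induction rst with
  | nil =>
    intro inStack hin _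
    rw [popLoopA]
    refine ⟨inStack, ?_, ?_⟩
    · rfl
    · intro x
      rw [hin x]
      simp [popW]
  | cons t ts ih =>
    intro inStack hin hnd
    have hcnt_t : (cnt.getD t 0 ≠ 0) ↔ t ∈ (w :: rest') := by
      rw [hcnt t]
      constructor
      · intro h
        by_contra hm
        rw [List.count_eq_zero_of_not_mem hm] at h
        simp at h
      · intro hm h
        have := List.count_pos_iff.mpr hm
        omega
    have hcond_iff : (w < t ∧ cnt.getD t 0 ≠ 0) ↔ (w < t ∧ t ∈ rest') := by
      constructor
      · rintro ⟨h1, h2⟩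
        rcases List.mem_cons.mp (hcnt_t.mp h2) with rfl | hm
        · exact absurd h1 (lt_irrefl _)
        · exact ⟨h1, hm⟩
      · rintro ⟨h1, h2⟩
        exact ⟨h1, hcnt_t.mpr (List.mem_cons_of_mem _ h2)⟩
    have hrev : (t :: ts).reverse = ts.reverse ++ [t] := by simp
    rw [hrev, popLoopA]
    split
    case _ heq => exact absurd (List.getLast?_concat.symm.trans heq) (by simp)
    case _ t' heq =>
      have ht' : t' = t := by
        have := List.getLast?_concat.symm.trans heq
        exact (Option.some.inj this).symm
      rw [ht']
      by_cases hcond : w < t ∧ t ∈ rest'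
      · rw [if_pos (hcond_iff.mpr hcond), List.dropLast_concat]
        have hin' : ∀ x, (inStack.insert t 0).getD x 0 ≠ 0 ↔ x ∈ ts := by
          intro x
          rw [PySem.Dict.getD_insert]
          by_cases hx : x = t
          · subst hx
            simp [(List.nodup_cons.mp hnd).1]
          · rw [if_neg hx, hin x]
            simp [hx]
        rcases ih (inStack.insert t 0) hin' (List.nodup_cons.mp hnd).2 with ⟨d, hd1, hd2⟩
        refine ⟨d, ?_, ?_⟩
        · rw [hd1]
          simp only [popW, if_pos hcond]
        · intro x
          rw [hd2 x]
          simp only [popW, if_pos hcond]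
      · rw [if_neg (fun h => hcond (hcond_iff.mp h))]
        refine ⟨inStack, ?_, ?_⟩
        · simp only [popW, if_neg hcond, hrev]
        · intro x
          rw [hin x]
          simp only [popW, if_neg hcond]

theorem simGo : ∀ (rest : List Char) (cnt inStack : PySem.Dict Char Int) (rst : List Char),
    (∀ x, cnt.getD x 0 = (rest.count x : Int)) →
    (∀ x, inStack.getD x 0 ≠ 0 ↔ x ∈ rst) → rst.Nodup →
    (rest.foldl stepA (cnt, inStack, rst.reverse)).2.2 = (goM rst rest).reverse := by
  intro rest
  induction rest with
  | nil =>
    intro cnt inStack rst _ _ _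
    simp [goM]
  | cons w rest' ih =>
    intro cnt inStack rst hcnt hin hnd
    rw [List.foldl_cons]
    have hcnt' : ∀ x, (cnt.insert w (cnt.getD w 0 - 1)).getD x 0 = ((rest'.count x : Nat) : Int) := by
      intro x
      rw [PySem.Dict.getD_insert]
      by_cases hx : x = w
      · subst hx
        rw [if_pos rfl, hcnt x]
        rw [List.count_cons]
        simp
      · rw [if_neg hx, hcnt x]
        rw [List.count_cons]
        simp [Ne.symm hx]
    by_cases hw : w ∈ rst
    · have hc0 : ¬ inStack.getD w 0 = 0 := fun h => by
        have := (hin w).mpr hw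
        exact this h
      have hstep : stepA (cnt, inStack, rst.reverse) w =
          (cnt.insert w (cnt.getD w 0 - 1), inStack, rst.reverse) := by
        simp only [stepA, if_neg hc0]
      rw [hstep]
      have := ih (cnt.insert w (cnt.getD w 0 - 1)) inStack rst hcnt' hin hnd
      rw [this]
      simp only [goM, if_pos hw]
    · have hc0 : inStack.getD w 0 = 0 := by
        by_contra h
        exact hw ((hin w).mp h)
      rcases simPop w rest' cnt (by
          intro x
          rw [hcnt x]) rst inStack hin hnd with ⟨d, hd1, hd2⟩
      have hstep : stepA (cnt, inStack, rst.reverse) w =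
          (cnt.insert w (cnt.getD w 0 - 1), d.insert w 1,
            (popW w rest' rst).reverse ++ [w]) := by
        simp only [stepA, if_pos hc0, hd1]
      rw [hstep]
      have hrev : (popW w rest' rst).reverse ++ [w] = (w :: popW w rest' rst).reverse := by
        simp
      rw [hrev]
      have hin' : ∀ x, (d.insert w 1).getD x 0 ≠ 0 ↔ x ∈ w :: popW w rest' rst := by
        intro x
        rw [PySem.Dict.getD_insert]
        by_cases hx : x = w
        · subst hx
          simp
        · rw [if_neg hx, hd2 x]
          simp [hx]
      have hnd' : (w :: popW w rest' rst).Nodup := by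
        rw [List.nodup_cons]
        refine ⟨fun hm => hw (popW_subset hm), ?_⟩
        exact ((popW_suffix w rest' rst).sublist).nodup hnd
      have := ih (cnt.insert w (cnt.getD w 0 - 1)) (d.insert w 1)
        (w :: popW w rest' rst) hcnt' hin' hnd'
      rw [this]
      simp only [goM, if_neg hw]

theorem bridgeA (s : String) : lc_316 s = String.ofList ((goM [] s.toList).reverse) := by
  unfold lc_316
  have := simGo s.toList (PySem.Dict.counter s.toList) PySem.Dict.empty []
    (fun x => by rw [PySem.Dict.getD_counter]) (fun x => by simp [PySem.Dict.getD_empty])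
    List.nodup_nil
  simp only [List.reverse_nil] at this
  rw [this]

-- ===== VERDICT (by name: the statement is the Claim_ definition above) =====
theorem lc_316_spec : Claim_equal_lc_316 := by
  intro s _
  show lc_316 s = lc_316_alt s
  rw [bridgeA, core, lc_316_alt, List.reverse_reverse]
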